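-- pv_equiv track=rewrite | github.com/JJGO/pylot | experiment/util.py | delete_with_prefix
-- ===== SOURCE A (Python) =====
-- def delete_with_prefix(d, pre):
--     todelete = []
--     for k in d:
--         if k.startswith(pre):
--             todelete.append(k)
--     for k in todelete:
--         del d[k]
--     return d
-- ===== SOURCE B (Python) =====
-- def delete_with_prefix(d, pre):
--     # Drain d from the back with popitem() into a survivor dict (reverse order),
--     # then drain that back into d, which restores the original order.
--     kept = {}
--     while d:
--         k, v = d.popitem()
--         if not k.startswith(pre):
--             kept[k] = v
--     while kept:
--         k, v = kept.popitem()
--         d[k] = v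
--     return d
-- ===== Notes on version B (the rewrite author's own statement) =====
-- stated objective: alternative
-- what changed: Instead of collecting victim keys and deleting them one by one, B drains d destructively with popitem() into a survivor dict and drains that back into d, restoring the original order in place; same value, different traversal and state.
import Mathlib
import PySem

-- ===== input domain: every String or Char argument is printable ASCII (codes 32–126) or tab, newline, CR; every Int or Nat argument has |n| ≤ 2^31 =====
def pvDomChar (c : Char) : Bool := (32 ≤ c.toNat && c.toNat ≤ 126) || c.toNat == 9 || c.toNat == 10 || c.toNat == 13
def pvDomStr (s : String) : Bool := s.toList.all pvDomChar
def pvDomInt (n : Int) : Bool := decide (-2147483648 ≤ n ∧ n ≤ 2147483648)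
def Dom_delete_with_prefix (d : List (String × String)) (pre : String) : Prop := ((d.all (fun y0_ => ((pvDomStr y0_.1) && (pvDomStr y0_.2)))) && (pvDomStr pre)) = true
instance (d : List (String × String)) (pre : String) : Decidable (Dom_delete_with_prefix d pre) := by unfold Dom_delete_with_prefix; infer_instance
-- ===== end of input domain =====

-- B drains d from the back with popitem() into a survivor dict and then drains that back into d
-- (restoring the original order), instead of collecting victim keys and deleting them one by one;
-- same O(n) cost, a different traversal and state. Both A and B mutate the dict d in place to the
-- same final contents and return the same object; the ports model the returned value. The Python
-- argument is a dict, modelled here by PySem.Dict.ofList of the pair list.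

-- ===== PORT A =====
def delete_with_prefix (d : List (String × String)) (pre : String) : List (String × String) :=
  let dd := PySem.Dict.ofList d
  -- todelete = []; for k in d: if k.startswith(pre): todelete.append(k)
  let todelete := dd.keys.foldl
    (fun acc k => if PySem.Str.startswith k pre then acc ++ [k] else acc) []
  -- for k in todelete: del d[k]
  (todelete.foldl PySem.Dict.erase dd).items

-- ===== PORT B =====
def delete_with_prefix_alt (d : List (String × String)) (pre : String) : List (String × String) :=
  let dd := PySem.Dict.ofList d
  -- while d: k, v = d.popitem(); if not k.startswith(pre): kept[k] = v
  -- (popitem pops the LAST item, so the loop consumes dd.items back to front)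
  let kept := dd.items.reverse.foldl
    (fun kept kv => if !(PySem.Str.startswith kv.1 pre) then kept.insert kv.1 kv.2 else kept)
    (PySem.Dict.empty : PySem.Dict String String)
  -- while kept: k, v = kept.popitem(); d[k] = v   (d is empty at this point)
  (kept.items.reverse.foldl (fun acc kv => acc.insert kv.1 kv.2)
    (PySem.Dict.empty : PySem.Dict String String)).items

-- ===== PRECONDITION & SPEC =====
def Spec_delete_with_prefix (d : List (String × String)) (pre : String) (out : List (String × String)) : Prop := out = delete_with_prefix_alt d pre
instance (d : List (String × String)) (pre : String) (out : List (String × String)) : Decidable (Spec_delete_with_prefix d pre out) := by unfold Spec_delete_with_prefix; infer_instance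

-- ===== CLAIM (what is proved, stated in full; the proofs are below) =====
def Claim_equal_delete_with_prefix : Prop := ∀ (d : List (String × String)) (pre : String), Dom_delete_with_prefix d pre → Spec_delete_with_prefix d pre (delete_with_prefix d pre)

-- ===== LEMMAS AND PROOFS =====

-- A conditional insert loop is the unconditional insert loop over the filtered list.
theorem foldl_ite_insert {α : Type} (p : α → Bool) (f : PySem.Dict String String → α → PySem.Dict String String)
    (l : List α) (init : PySem.Dict String String) :
    l.foldl (fun d a => if p a then f d a else d) init = (l.filter p).foldl f init := by
  induction l generalizing init with
  | nil => rfl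
  | cons a l ih =>
      by_cases h : p a = true <;> simp [h, ih]

-- Inserting a pair list with distinct keys into the empty dict yields exactly that list.
theorem foldl_insert_empty_items (l : List (String × String)) (hnd : (l.map Prod.fst).Nodup) :
    (l.foldl (fun acc kv => acc.insert kv.1 kv.2)
      (PySem.Dict.empty : PySem.Dict String String)).items = l := by
  have h := PySem.Dict.items_foldl_insert_fresh l Prod.fst Prod.snd PySem.Dict.empty
    (by intro a _; simp [PySem.Dict.contains_empty]) hnd
  simpa using h

-- Deleting every key in ks from a dict filters out exactly the items whose key is in ks.
theorem foldl_erase_items (ks : List String) (dd : PySem.Dict String String) :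
    (ks.foldl PySem.Dict.erase dd).items
      = dd.items.filter (fun p => !(ks.contains p.1)) := by
  induction ks generalizing dd with
  | nil => simp
  | cons k ks ih =>
      simp only [List.foldl_cons, ih, PySem.Dict.erase, List.filter_filter]
      apply List.filter_congr
      intro p _
      by_cases h : p.1 = k <;> simp [h]

-- The key map of a filtered sublist of a Nodup-keyed list is Nodup.
theorem nodup_keys_filter (l : List (String × String)) (p : String × String → Bool)
    (h : (l.map Prod.fst).Nodup) : ((l.filter p).map Prod.fst).Nodup :=
  h.sublist (List.Sublist.map Prod.fst List.filter_sublist)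

-- ===== VERDICT (by name: the statement is the Claim_ definition above) =====
theorem delete_with_prefix_spec : Claim_equal_delete_with_prefix := by
  intro d pre _
  unfold Spec_delete_with_prefix delete_with_prefix delete_with_prefix_alt
  set dd := PySem.Dict.ofList d with hdd
  have hnd : (dd.items.map Prod.fst).Nodup := PySem.Dict.nodup_keys_ofList d
  have hndr : (dd.items.reverse.map Prod.fst).Nodup := by
    rw [List.map_reverse]
    exact List.nodup_reverse.mpr hnd
  -- B side: the first drain loop keeps the reversed survivors, the second reverses them back.
  -- A side: erasing the collected keys filters the items.
  simp only [foldl_ite_insert, PySem.List.foldl_append_if_eq_filter, List.nil_append,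
    foldl_erase_items]
  rw [foldl_insert_empty_items _ (nodup_keys_filter _ _ hndr),
      ← List.filter_reverse, List.reverse_reverse,
      foldl_insert_empty_items _ (nodup_keys_filter _ _ hnd)]
  apply List.filter_congr
  intro p hp
  have hk : p.1 ∈ dd.keys := PySem.Dict.mem_keys_of_mem_items dd hp
  by_cases h : PySem.Str.startswith p.1 pre = true
  · simp [List.mem_filter, hk]
  · simp only [Bool.not_eq_true] at h
    simp only [h, Bool.not_false, Bool.not_eq_true', List.contains_eq_mem,
      decide_eq_false_iff_not, List.mem_filter, not_and]
    intro _
    simp
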